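-- pv_equiv track=rewrite | github.com/IES-Rafael-Alberti/dawb1-2425-ejercicios-u2-JoseAntonioDiazBusati | src/Bucles/ej22_25.py | devolver_palabras
-- ===== SOURCE A (Python) =====
-- def devolver_palabras(frase: list[str]):
--     larger = ""
--     num_palabra = 0
--     for palabra in frase:
--         if len(palabra) > len(larger):
--             larger = palabra
--         num_palabra += 1
--     return larger, num_palabra
-- ===== SOURCE B (Python) =====
-- def devolver_palabras(frase: list[str]):
--     if not frase:
--         return "", 0
--     ordenadas = sorted(frase, key=len, reverse=True)
--     return ordenadas[0], len(frase)
-- ===== Notes on version B (the rewrite author's own statement) =====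
-- stated objective: alternative
-- what changed: Replaces A's single accumulator loop (running longest + counter) with a sort-based algorithm: stable-sort the words by length in descending order and take the head (stability makes it the first longest word), with the count taken as len(frase).
import Mathlib
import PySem

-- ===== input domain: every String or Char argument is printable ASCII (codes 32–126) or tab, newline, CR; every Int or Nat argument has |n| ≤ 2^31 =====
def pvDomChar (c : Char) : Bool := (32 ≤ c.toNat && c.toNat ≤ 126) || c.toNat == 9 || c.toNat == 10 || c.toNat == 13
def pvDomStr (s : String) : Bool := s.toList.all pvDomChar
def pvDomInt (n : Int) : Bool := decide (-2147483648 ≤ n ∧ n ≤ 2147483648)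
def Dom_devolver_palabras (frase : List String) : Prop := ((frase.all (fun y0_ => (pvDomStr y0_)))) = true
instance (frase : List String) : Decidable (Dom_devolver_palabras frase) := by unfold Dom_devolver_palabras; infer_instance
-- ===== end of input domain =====

-- B replaces A's accumulator loop (running longest + counter) with a sort-based algorithm:
-- stable descending sort by length, then take the head; same result, different algorithm.

-- ===== PORT A =====
def devolver_palabras (frase : List String) : String × Int :=
  frase.foldl
    (fun st palabra =>
      if PySem.Str.len palabra > PySem.Str.len st.1 then (palabra, st.2 + 1)
      else (st.1, st.2 + 1))
    ("", 0)

-- ===== PORT B =====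
def devolver_palabras_alt (frase : List String) : String × Int :=
  if frase = [] then ("", 0)
  else
    let ordenadas := PySem.List.sorted frase (fun w => PySem.Str.len w) true
    -- ordenadas[0]: ordenadas is a permutation of the non-empty frase, so indexing cannot raise;
    -- headD "" is exact here (the default is never used).
    (ordenadas.headD "", (frase.length : Int))

-- ===== PRECONDITION & SPEC =====
def Spec_devolver_palabras (frase : List String) (out : String × Int) : Prop := out = devolver_palabras_alt frase
instance (frase : List String) (out : String × Int) : Decidable (Spec_devolver_palabras frase out) := by unfold Spec_devolver_palabras; infer_instance

-- ===== CLAIM (what is proved, stated in full; the proofs are below) =====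
def Claim_equal_devolver_palabras : Prop := ∀ (frase : List String), Dom_devolver_palabras frase → Spec_devolver_palabras frase (devolver_palabras frase)

-- ===== LEMMAS AND PROOFS =====

-- The running first-longest word both algorithms compute, named for the proofs.
def runmax (a : String) (l : List String) : String :=
  l.foldl (fun b p => if PySem.Str.len b < PySem.Str.len p then p else b) a

lemma runmax_cons (a x : String) (t : List String) :
    runmax a (x :: t) = runmax (if PySem.Str.len a < PySem.Str.len x then x else a) t := rfl

lemma insertBy_nil (before : String → String → Bool) (x : String) :
    PySem.List.insertBy before x [] = [x] := rfl

lemma insertBy_cons (before : String → String → Bool) (x y : String) (ys : List String) :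
    PySem.List.insertBy before x (y :: ys)
      = if before x y then x :: y :: ys else y :: PySem.List.insertBy before x ys := rfl

-- A's loop started at (a, n) computes (runmax a t, n + |t|).
lemma foldA_eq (t : List String) : ∀ (a : String) (n : Int),
    t.foldl
      (fun st palabra =>
        if PySem.Str.len palabra > PySem.Str.len st.1 then (palabra, st.2 + 1)
        else (st.1, st.2 + 1)) (a, n)
      = (runmax a t, n + t.length) := by
  induction t with
  | nil => intro a n; simp [runmax]
  | cons x t ih =>
    intro a n
    rw [List.foldl_cons, runmax_cons]
    by_cases h : PySem.Str.len a < PySem.Str.len x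
    · rw [if_pos h, ih x ((a, n).2 + 1), Prod.mk.injEq]
      refine ⟨by rw [if_pos h], by simp; omega⟩
    · rw [if_neg h, ih (a, n).1 ((a, n).2 + 1), Prod.mk.injEq]
      refine ⟨by rw [if_neg h], by simp; omega⟩

-- The insertion-sort fold (descending by length) keeps runmax of the inserted words at the head.
lemma ins_head (xs : List String) : ∀ (h : String) (tacc : List String), ∃ t',
    xs.foldl
      (fun acc x => PySem.List.insertBy (fun a b => decide (PySem.Str.len b < PySem.Str.len a)) x acc)
      (h :: tacc)
      = runmax h xs :: t' := by
  induction xs with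
  | nil => intro h tacc; exact ⟨tacc, by simp [runmax]⟩
  | cons x xs ih =>
    intro h tacc
    rw [List.foldl_cons, runmax_cons, insertBy_cons]
    by_cases hx : PySem.Str.len h < PySem.Str.len x
    · rw [if_pos (decide_eq_true hx), if_pos hx]
      exact ih x (h :: tacc)
    · rw [if_neg (by simpa using hx), if_neg hx]
      exact ih h _

lemma len_zero_eq (s : String) (h : ¬ PySem.Str.len s > PySem.Str.len "") : s = "" := by
  have hl : s.toList.length = 0 := by
    simp [PySem.Str.len] at h ⊢
    omega
  exact String.toList_eq_nil_iff.mp (List.length_eq_zero_iff.mp hl)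

-- ===== VERDICT (by name: the statement is the Claim_ definition above) =====
theorem devolver_palabras_spec : Claim_equal_devolver_palabras := by
  intro frase _
  unfold Spec_devolver_palabras devolver_palabras devolver_palabras_alt
  cases frase with
  | nil => simp
  | cons x t =>
    -- A's side: the first step takes x (when x = "" both branches give x), then foldA_eq.
    rw [List.foldl_cons]
    have hfirst : (if PySem.Str.len x > PySem.Str.len (("" : String), (0 : Int)).1
        then (x, (("" : String), (0 : Int)).2 + 1)
        else ((("" : String), (0 : Int)).1, (("" : String), (0 : Int)).2 + 1)) = (x, (1 : Int)) := by
      by_cases h : PySem.Str.len x > PySem.Str.len ""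
      · rw [if_pos h]; norm_num
      · rw [if_neg h, len_zero_eq x h]; norm_num
    rw [hfirst, foldA_eq t x 1]
    -- B's side: the sort is the insertBy fold started at [x]; its head is runmax x t.
    rw [if_neg (List.cons_ne_nil x t)]
    obtain ⟨t', ht⟩ := ins_head t x []
    have hsorted : PySem.List.sorted (x :: t) (fun w => PySem.Str.len w) true = runmax x t :: t' := by
      rw [PySem.List.sorted_rev_eq_foldl_insertBy, List.foldl_cons, insertBy_nil, ht]
    simp only [hsorted, List.headD_cons, Prod.mk.injEq]
    refine ⟨trivial, by push_cast [List.length_cons]; omega⟩
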